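-- pv_equiv track=rewrite | github.com/kbunggul/PythonPractice | lvl3/Fail/Remodelling.py | remodelling
-- ===== SOURCE A (Python) =====
-- def remodelling(n, weaks,dists):
--
--     for weak in weaks:
--         tmpWeaks = weaks[:]
--         tmpWeaks.remove(weak)
--
--         for dist in dists:
--             tmpDist = dists[:]
--             tmpDist.remove(dist)
--
--             if weak+dist > n:
--                 tmpWeaks = [i for i in tmpWeaks if i < weak and i >  weak + dist - n]
--             else:
--                 tmpWeaks = [i for i in tmpWeaks if i > weak+dist or i < weak]
--
--             if len(tmpWeaks) == 0:
--                 return True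
--
--             if remodelling(n,tmpWeaks,tmpDist):
--                 return True
--
--     return False
-- ===== SOURCE B (Python) =====
-- def remodelling(n, weaks, dists):
--     stack = [(weaks, dists)]
--     while stack:
--         ws, ds = stack.pop()
--         children = []
--         for w in ws:
--             tw = list(ws)
--             tw.remove(w)
--             for d in ds:
--                 td = list(ds)
--                 td.remove(d)
--                 if w + d > n:
--                     tw = [i for i in tw if i < w and i > w + d - n]
--                 else:
--                     tw = [i for i in tw if i > w + d or i < w]
--                 if not tw:
--                     return True
--                 children.append((tw, td))
--         stack.extend(reversed(children))
--     return False
-- ===== Notes on version B (the rewrite author's own statement) =====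
-- stated objective: alternative
-- what changed: Replaces A's recursion with an explicit worklist of (weaks, dists) frames: each popped frame's double loop collects its complete child-frame list at once (returning True immediately when a filtered weak-list becomes empty) and pushes it reversed onto the stack, instead of recursing into each child mid-loop; the result is the same because both are an existence search over the same frame tree.
import Mathlib
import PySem

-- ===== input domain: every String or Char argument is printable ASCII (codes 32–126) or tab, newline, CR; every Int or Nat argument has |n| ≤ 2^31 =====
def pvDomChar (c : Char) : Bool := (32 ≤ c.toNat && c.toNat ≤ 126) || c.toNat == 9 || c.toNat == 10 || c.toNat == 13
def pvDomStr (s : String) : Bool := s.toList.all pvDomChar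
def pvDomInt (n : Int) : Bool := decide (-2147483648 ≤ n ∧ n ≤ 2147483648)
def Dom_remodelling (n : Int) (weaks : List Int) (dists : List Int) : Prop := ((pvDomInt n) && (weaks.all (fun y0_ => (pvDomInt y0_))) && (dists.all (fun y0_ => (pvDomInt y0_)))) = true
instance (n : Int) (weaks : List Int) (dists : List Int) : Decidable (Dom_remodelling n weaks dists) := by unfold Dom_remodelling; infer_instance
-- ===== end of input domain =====

-- B replaces A's mid-loop recursion by an explicit stack of (weaks, dists) frames (alternative decomposition, same cost).

-- ===== PORT A =====
-- A's recursion: outer loop over weaks, inner loop over dists with the cumulatively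
-- re-filtered tmpWeaks; recursion on the child (tmpWeaks, tmpDist).  The
-- 'if h : td.length < dists.length' is a totality guard only: it always holds, because
-- d is drawn from dists itself (Python's dists.remove(d) always succeeds and shortens).
mutual
def remodelling (n : Int) (weaks : List Int) (dists : List Int) : Bool :=
  remOuter n weaks dists weaks
termination_by (dists.length, 2, 0)

def remOuter (n : Int) (weaks dists : List Int) : List Int → Bool
  | [] => false
  | w :: ws =>
    if remInner n w dists (weaks.erase w) dists then true
    else remOuter n weaks dists ws
termination_by l => (dists.length, 1, l.length)

def remInner (n w : Int) (dists : List Int) (tw : List Int) : List Int → Bool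
  | [] => false
  | d :: ds =>
    let td := dists.erase d
    let tw' := if w + d > n then tw.filter (fun i => decide (i < w ∧ i > w + d - n))
               else tw.filter (fun i => decide (i > w + d ∨ i < w))
    if tw'.length = 0 then true
    else if h : td.length < dists.length then
      if remodelling n tw' td then true
      else remInner n w dists tw' ds
    else remInner n w dists tw' ds
termination_by l => (dists.length, 0, l.length)
end

-- ===== PORT B =====
-- B: pop a frame, run the same double loop but only COLLECT the child frames
-- (none = an empty filtered tmpWeaks was hit, i.e. return True), then push them all (reversed,
-- so the LIFO pop visits them in loop order).
def altInner (n w : Int) (ds0 : List Int) (tw : List Int) :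
    List Int → Option (List (List Int × List Int))
  | [] => some []
  | d :: ds =>
    let td := ds0.erase d
    let tw' := if w + d > n then tw.filter (fun i => decide (i < w ∧ i > w + d - n))
               else tw.filter (fun i => decide (i > w + d ∨ i < w))
    if tw'.length = 0 then none
    else match altInner n w ds0 tw' ds with
      | none => none
      | some cs => some ((tw', td) :: cs)

def altOuter (n : Int) (ws0 ds0 : List Int) : List Int → Option (List (List Int × List Int))
  | [] => some []
  | w :: ws =>
    match altInner n w ds0 (ws0.erase w) ds0 with
    | none => none
    | some cs =>
      match altOuter n ws0 ds0 ws with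
      | none => none
      | some cs' => some (cs ++ cs')

def frameMeasure (f : List Int × List Int) : Nat := (f.1.length * f.2.length + 1) ^ f.2.length

def stackMeasure (st : List (List Int × List Int)) : Nat := (st.map frameMeasure).sum

theorem stackMeasure_nil : stackMeasure [] = 0 := rfl
theorem stackMeasure_cons (f : List Int × List Int) (st : List (List Int × List Int)) :
    stackMeasure (f :: st) = frameMeasure f + stackMeasure st := by simp [stackMeasure]
theorem stackMeasure_append (a b : List (List Int × List Int)) :
    stackMeasure (a ++ b) = stackMeasure a + stackMeasure b := by simp [stackMeasure]
theorem stackMeasure_reverse (a : List (List Int × List Int)) :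
    stackMeasure a.reverse = stackMeasure a := by
  simp [stackMeasure, List.sum_reverse]

-- termination lemma for runStack (the port cites it in decreasing_by, so it stays above)
theorem altInner_measure (n w : Int) (ds0 : List Int) (W : Nat) :
    ∀ (ds' tw : List Int) (cs : List (List Int × List Int)),
      ds' ⊆ ds0 → tw.length ≤ W → altInner n w ds0 tw ds' = some cs →
      stackMeasure cs ≤ ds'.length * (W * ds0.length + 1) ^ (ds0.length - 1) := by
  intro ds'
  induction ds' with
  | nil => intro tw cs _ _ h; simp [altInner] at h; subst h; simp [stackMeasure]
  | cons d ds ih =>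
    intro tw cs hsub hW h
    simp only [altInner] at h
    set tw' := if w + d > n then tw.filter (fun i => decide (i < w ∧ i > w + d - n))
               else tw.filter (fun i => decide (i > w + d ∨ i < w)) with htw'
    by_cases h0 : tw'.length = 0
    · simp [h0] at h
    · simp only [h0] at h
      cases hrec : altInner n w ds0 tw' ds with
      | none => rw [hrec] at h; simp at h
      | some cs1 =>
        rw [hrec] at h
        simp at h
        subst h
        have hd : d ∈ ds0 := hsub (by simp)
        have hds0 : ds0 ≠ [] := by rintro rfl; simp at hd
        have hlen : (ds0.erase d).length = ds0.length - 1 := List.length_erase_of_mem hd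
        have htwle : tw'.length ≤ tw.length := by
          rw [htw']; split <;> exact List.length_filter_le _ _
        have htwW : tw'.length ≤ W := le_trans htwle hW
        have hfm : frameMeasure (tw', ds0.erase d) ≤ (W * ds0.length + 1) ^ (ds0.length - 1) := by
          simp only [frameMeasure, hlen]
          apply Nat.pow_le_pow_left
          have h1 : tw'.length * (ds0.length - 1) ≤ W * ds0.length :=
            Nat.mul_le_mul htwW (Nat.sub_le _ _)
          omega
        have hcs1 : stackMeasure cs1 ≤ ds.length * (W * ds0.length + 1) ^ (ds0.length - 1) :=
          ih tw' cs1 (fun x hx => hsub (by simp [hx])) htwW hrec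
        rw [stackMeasure_cons]
        have hlcons : (d :: ds).length = ds.length + 1 := by simp
        rw [hlcons, Nat.succ_mul]
        omega

theorem altOuter_measure (n : Int) (ws0 ds0 : List Int) :
    ∀ (ws' : List Int) (cs : List (List Int × List Int)),
      altOuter n ws0 ds0 ws' = some cs →
      stackMeasure cs ≤ ws'.length * (ds0.length * (ws0.length * ds0.length + 1) ^ (ds0.length - 1)) := by
  intro ws'
  induction ws' with
  | nil => intro cs h; simp [altOuter] at h; subst h; simp [stackMeasure]
  | cons w ws ih =>
    intro cs h
    simp only [altOuter] at h
    cases hin : altInner n w ds0 (ws0.erase w) ds0 with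
    | none => rw [hin] at h; simp at h
    | some cs1 =>
      rw [hin] at h
      cases hout : altOuter n ws0 ds0 ws with
      | none => rw [hout] at h; simp at h
      | some cs2 =>
        rw [hout] at h; simp at h; subst h
        have h1 : stackMeasure cs1 ≤ ds0.length * (ws0.length * ds0.length + 1) ^ (ds0.length - 1) :=
          altInner_measure n w ds0 ws0.length ds0 (ws0.erase w) cs1 (fun x hx => hx)
            (List.length_erase_le) hin
        have h2 := ih cs2 hout
        rw [stackMeasure_append]
        have hlcons : (w :: ws).length = ws.length + 1 := by simp
        rw [hlcons, Nat.succ_mul]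
        omega

theorem altOuter_measure_lt (n : Int) (ws ds : List Int) (cs : List (List Int × List Int))
    (h : altOuter n ws ds ws = some cs) : stackMeasure cs < frameMeasure (ws, ds) := by
  have hb := altOuter_measure n ws ds ws cs h
  rcases Nat.eq_zero_or_pos ds.length with hd | hd
  · -- no dists: no children are ever produced
    have : stackMeasure cs ≤ 0 := by simpa [hd] using hb
    have : stackMeasure cs = 0 := Nat.le_zero.mp this
    simp [this, frameMeasure, hd]
  · simp only [frameMeasure]
    have hK : 0 < (ws.length * ds.length + 1) ^ (ds.length - 1) := Nat.pow_pos (by omega)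
    calc stackMeasure cs
        ≤ ws.length * (ds.length * (ws.length * ds.length + 1) ^ (ds.length - 1)) := hb
      _ = (ws.length * ds.length) * (ws.length * ds.length + 1) ^ (ds.length - 1) := by ring
      _ < (ws.length * ds.length + 1) * (ws.length * ds.length + 1) ^ (ds.length - 1) := by
          exact (Nat.mul_lt_mul_right hK).mpr (by omega)
      _ = (ws.length * ds.length + 1) ^ (ds.length - 1 + 1) := by rw [pow_succ]; ring
      _ = (ws.length * ds.length + 1) ^ ds.length := by congr 1; omega

def runStack (n : Int) (st : List (List Int × List Int)) : Bool :=
  match h : st.getLast? with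
  | none => false
  | some f =>
    match h2 : altOuter n f.1 f.2 f.1 with
    | none => true
    | some cs => runStack n (st.dropLast ++ cs.reverse)
termination_by stackMeasure st
decreasing_by
  obtain ⟨l', rfl⟩ := List.getLast?_eq_some_iff.mp h
  have hdl : (l' ++ [f]).dropLast = l' := by simp
  have hlt : stackMeasure cs < frameMeasure f := altOuter_measure_lt n f.1 f.2 cs h2
  rw [hdl, stackMeasure_append, stackMeasure_append, stackMeasure_cons, stackMeasure_nil,
    stackMeasure_reverse]
  omega

def remodelling_alt (n : Int) (weaks : List Int) (dists : List Int) : Bool :=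
  runStack n [(weaks, dists)]

-- ===== PRECONDITION & SPEC =====
def Spec_remodelling (n : Int) (weaks : List Int) (dists : List Int) (out : Bool) : Prop := out = remodelling_alt n weaks dists
instance (n : Int) (weaks : List Int) (dists : List Int) (out : Bool) : Decidable (Spec_remodelling n weaks dists out) := by unfold Spec_remodelling; infer_instance

-- ===== CLAIM (what is proved, stated in full; the proofs are below) =====
def Claim_equal_remodelling : Prop := ∀ (n : Int) (weaks : List Int) (dists : List Int), Dom_remodelling n weaks dists → Spec_remodelling n weaks dists (remodelling n weaks dists)

-- ===== LEMMAS AND PROOFS =====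

theorem frameMeasure_pos (f : List Int × List Int) : 1 ≤ frameMeasure f :=
  Nat.one_le_pow _ _ (by omega)

-- Bridge: A's inner loop = "some pair hits an empty tmpWeaks (none) or some collected child succeeds"
theorem inner_bridge (n w : Int) (ds0 : List Int) :
    ∀ (ds' tw : List Int), ds' ⊆ ds0 →
      remInner n w ds0 tw ds' =
        (match altInner n w ds0 tw ds' with
         | none => true
         | some cs => cs.any (fun f => remodelling n f.1 f.2)) := by
  intro ds'
  induction ds' with
  | nil => intro tw _; simp [remInner, altInner]
  | cons d ds ih =>
    intro tw hsub
    have hd : d ∈ ds0 := hsub (by simp)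
    have hds0 : ds0 ≠ [] := by rintro rfl; simp at hd
    have hguard : (ds0.erase d).length < ds0.length := by
      rw [List.length_erase_of_mem hd]
      have : 0 < ds0.length := List.length_pos_of_ne_nil hds0
      omega
    simp only [remInner, altInner]
    set tw' := if w + d > n then tw.filter (fun i => decide (i < w ∧ i > w + d - n))
               else tw.filter (fun i => decide (i > w + d ∨ i < w)) with htw'
    by_cases h0 : tw'.length = 0
    · simp [h0]
    · simp only [h0, dif_pos hguard, if_false]
      have ihs : remInner n w ds0 tw' ds =
          (match altInner n w ds0 tw' ds with
           | none => true
           | some cs => cs.any (fun f => remodelling n f.1 f.2)) :=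
        ih tw' (fun x hx => hsub (by simp [hx]))
      cases hrec : altInner n w ds0 tw' ds with
      | none =>
        rw [hrec] at ihs
        simp only [ihs]
        cases remodelling n (tw') (ds0.erase d) <;> simp
      | some cs =>
        rw [hrec] at ihs
        simp only [ihs, List.any_cons]
        cases remodelling n (tw') (ds0.erase d) <;> simp

theorem outer_bridge (n : Int) (ws0 ds0 : List Int) :
    ∀ (ws' : List Int),
      remOuter n ws0 ds0 ws' =
        (match altOuter n ws0 ds0 ws' with
         | none => true
         | some cs => cs.any (fun f => remodelling n f.1 f.2)) := by
  intro ws'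
  induction ws' with
  | nil => simp [remOuter, altOuter]
  | cons w ws ih =>
    simp only [remOuter, altOuter]
    have hin := inner_bridge n w ds0 ds0 (ws0.erase w) (fun x hx => hx)
    cases hrec : altInner n w ds0 (ws0.erase w) ds0 with
    | none => rw [hrec] at hin; simp [hin]
    | some cs =>
      rw [hrec] at hin
      rw [hin, ih]
      cases hout : altOuter n ws0 ds0 ws with
      | none =>
        simp only
        cases cs.any (fun f => remodelling n f.1 f.2) <;> simp
      | some cs' =>
        simp only [List.any_append]
        cases cs.any (fun f => remodelling n f.1 f.2) <;> simp

theorem rem_eq_children (n : Int) (ws ds : List Int) :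
    remodelling n ws ds =
      (match altOuter n ws ds ws with
       | none => true
       | some cs => cs.any (fun f => remodelling n f.1 f.2)) := by
  rw [remodelling]; exact outer_bridge n ws ds ws

theorem runStack_eq_any (n : Int) :
    ∀ (m : Nat) (st : List (List Int × List Int)), stackMeasure st ≤ m →
      runStack n st = st.any (fun f => remodelling n f.1 f.2) := by
  intro m
  induction m using Nat.strong_induction_on with
  | _ m ih =>
    intro st hm
    rw [runStack.eq_def]
    split
    · rename_i hlast
      have hnil : st = [] := List.getLast?_eq_none_iff.mp hlast
      simp [hnil]
    · rename_i f hlast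
      obtain ⟨l', rfl⟩ := List.getLast?_eq_some_iff.mp hlast
      have hdl : (l' ++ [f]).dropLast = l' := by simp
      have hmeas : stackMeasure (l' ++ [f]) = stackMeasure l' + frameMeasure f := by
        rw [stackMeasure_append, stackMeasure_cons, stackMeasure_nil]; omega
      have hany : (l' ++ [f]).any (fun f => remodelling n f.1 f.2)
          = (l'.any (fun f => remodelling n f.1 f.2) || remodelling n f.1 f.2) := by
        simp
      split
      · rename_i hch
        have hfa : remodelling n f.1 f.2 = true := by
          rw [rem_eq_children]
          have : altOuter n f.1 f.2 f.1 = none := hch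
          rw [this]
        rw [hany, hfa]
        simp
      · rename_i cs hch
        have hch' : altOuter n f.1 f.2 f.1 = some cs := hch
        have hlt : stackMeasure cs < frameMeasure f := altOuter_measure_lt n f.1 f.2 cs hch'
        have hm2 : stackMeasure ((l' ++ [f]).dropLast ++ cs.reverse)
            = stackMeasure l' + stackMeasure cs := by
          rw [hdl, stackMeasure_append, stackMeasure_reverse]
        have hf1 : 1 ≤ frameMeasure f := frameMeasure_pos f
        have hrec : runStack n ((l' ++ [f]).dropLast ++ cs.reverse)
            = ((l' ++ [f]).dropLast ++ cs.reverse).any (fun f => remodelling n f.1 f.2) := by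
          rcases Nat.eq_zero_or_pos m with rfl | hmpos
          · omega
          · exact ih (m - 1) (by omega) ((l' ++ [f]).dropLast ++ cs.reverse) (by omega)
        rw [hrec, hdl, List.any_append, List.any_reverse, hany]
        have hfeq : remodelling n f.1 f.2 = cs.any (fun f => remodelling n f.1 f.2) := by
          rw [rem_eq_children, hch']
        rw [hfeq]

-- ===== VERDICT (by name: the statement is the Claim_ definition above) =====
theorem remodelling_spec : Claim_equal_remodelling := by
  intro n weaks dists _
  unfold Spec_remodelling remodelling_alt
  rw [runStack_eq_any n (stackMeasure [(weaks, dists)]) [(weaks, dists)] (le_refl _)]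
  simp
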